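-- pv_equiv track=rewrite | github.com/yeonk-dev/Python | 으뜸 파이썬5 리스트_연습문제.py | count_man_women
-- ===== SOURCE A (Python) =====
-- def count_man_women(plist):
--     man=0
--     women=0
--     for i in range(2,len(plist),5):
--         if plist[i]==0:
--             women+=1
--         else:
--             man+=1
--     return man,women
-- ===== SOURCE B (Python) =====
-- def count_man_women(plist):
--     s = plist[2::5]
--     women = s.count(0)
--     return len(s) - women, women
-- ===== Notes on version B (the rewrite author's own statement) =====
-- stated objective: simpler
-- what changed: Replaces the index loop over range(2,len,5) with its per-element if/else branch by slicing plist[2::5] once, counting zeros with .count(0), and deriving the men count arithmetically as len(s)-women.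
import Mathlib
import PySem

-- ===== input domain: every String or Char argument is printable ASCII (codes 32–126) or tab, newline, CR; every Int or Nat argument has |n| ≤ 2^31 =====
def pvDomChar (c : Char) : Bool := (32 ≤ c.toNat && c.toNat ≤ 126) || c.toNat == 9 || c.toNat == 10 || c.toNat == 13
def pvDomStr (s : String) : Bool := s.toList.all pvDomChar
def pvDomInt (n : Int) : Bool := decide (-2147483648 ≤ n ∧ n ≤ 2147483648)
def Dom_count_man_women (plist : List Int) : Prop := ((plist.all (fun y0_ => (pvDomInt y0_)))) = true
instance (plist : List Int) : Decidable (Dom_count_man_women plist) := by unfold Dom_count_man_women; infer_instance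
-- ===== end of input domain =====

-- B replaces A's index loop with a branch by one stride slice, .count(0) and a subtraction (simpler decomposition).

-- ===== PORT A =====
-- for i in range(2, len(plist), 5): if plist[i]==0: women+=1 else man+=1
-- (the index i is always in range, so pyGetD's default is never reached)
def count_man_women (plist : List Int) : Int × Int :=
  (PySem.List.pyRange 2 (plist.length : Int) 5).foldl
    (fun (mw : Int × Int) i =>
      if PySem.List.pyGetD plist i 0 == 0 then (mw.1, mw.2 + 1) else (mw.1 + 1, mw.2))
    (0, 0)

-- ===== PORT B =====
-- s = plist[2::5]; women = s.count(0); return len(s) - women, women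
-- (step 5 ≠ 0, so slice? always returns some; getD [] is never reached)
def count_man_women_alt (plist : List Int) : Int × Int :=
  let s := (PySem.List.slice? plist (some 2) none 5).getD []
  let women : Int := (PySem.List.count s 0 : Int)
  ((s.length : Int) - women, women)

-- ===== PRECONDITION & SPEC =====
def Spec_count_man_women (plist : List Int) (out : Int × Int) : Prop := out = count_man_women_alt plist
instance (plist : List Int) (out : Int × Int) : Decidable (Spec_count_man_women plist out) := by unfold Spec_count_man_women; infer_instance

-- ===== CLAIM (what is proved, stated in full; the proofs are below) =====
def Claim_equal_count_man_women : Prop := ∀ (plist : List Int), Dom_count_man_women plist → Spec_count_man_women plist (count_man_women plist)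

-- ===== LEMMAS AND PROOFS =====

-- filterMap by a function that is 'some ∘ g' on the list is just map g
lemma pv_filterMap_eq_map {α β : Type} (l : List α) (f : α → Option β) (g : α → β)
    (h : ∀ x ∈ l, f x = some (g x)) : l.filterMap f = l.map g := by
  induction l with
  | nil => rfl
  | cons a t ih =>
    simp [h a (by simp)]
    exact ih (fun x hx => h x (by simp [hx]))

-- A's loop body, folded over a list of values, counts nonzeros/zeros
lemma pv_fold_count (l : List Int) (m w : Int) :
    l.foldl (fun (mw : Int × Int) x =>
        if x == 0 then (mw.1, mw.2 + 1) else (mw.1 + 1, mw.2)) (m, w)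
      = (m + ((l.length : Int) - (l.count 0 : Int)), w + (l.count 0 : Int)) := by
  induction l generalizing m w with
  | nil => simp
  | cons a t ih =>
    simp only [List.foldl_cons]
    by_cases ha : a = 0
    · rw [if_pos (by simp [ha]), ih]
      simp [ha, Prod.ext_iff]
      omega
    · rw [if_neg (by simp [ha]), ih]
      simp [ha, Prod.ext_iff]
      omega

-- the stride slice equals the map of lookups over A's index range
lemma pv_slice_eq_map (plist : List Int) :
    (PySem.List.slice? plist (some 2) none 5).getD []
      = (PySem.List.pyRange 2 (plist.length : Int) 5).map
          (fun i => PySem.List.pyGetD plist i 0) := by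
  rw [PySem.List.pyRange_of_pos 2 (plist.length : Int) (by norm_num)]
  unfold PySem.List.slice? PySem.List.sliceIndices
  norm_num
  by_cases h2 : (plist.length : Int) ≤ 2
  · rw [if_neg (by omega), if_neg (by omega)]
    simp
  · rw [if_pos (by omega)]
    have hmin : min 2 (plist.length : Int) = 2 := by omega
    rw [hmin, if_pos (by omega)]
    apply pv_filterMap_eq_map
    intro k hk
    simp only [List.mem_range] at hk
    have hlt : 2 + 5 * (k : Int) < plist.length := by omega
    have hidx : (2 + 5 * (k : Int)).toNat = 2 + 5 * k := by omega
    have hltn : 2 + 5 * k < plist.length := by omega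
    simp [hidx, List.getElem?_eq_getElem hltn, Function.comp]
    have : ((2 : Int) + 5 * (k : Int)) = ((2 + 5 * k : Nat) : Int) := by push_cast; ring
    rw [this, PySem.List.pyGetD_natCast]
    simp [List.getD_eq_getElem?_getD, List.getElem?_eq_getElem hltn]

-- ===== VERDICT (by name: the statement is the Claim_ definition above) =====
theorem count_man_women_spec : Claim_equal_count_man_women := by
  intro plist _
  show count_man_women plist = count_man_women_alt plist
  have h := pv_fold_count ((PySem.List.pyRange 2 (plist.length : Int) 5).map
      (fun i => PySem.List.pyGetD plist i 0)) 0 0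
  rw [List.foldl_map] at h
  unfold count_man_women count_man_women_alt
  rw [h, pv_slice_eq_map]
  simp [PySem.List.count_eq]
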